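-- pv_equiv track=rewrite | github.com/DiegoPrandi/MyCodeStudies | python/001_exerciseList-pucc/2026/lista7-estudoProva/8.py | funciona
-- ===== SOURCE A (Python) =====
-- def funciona(n):
--     soma = 0
--     maior = 0
--
--     while n > 0:
--         digito = n % 10
--         soma += digito
--         if digito > maior:
--             maior = digito
--         n //= 10
--     return soma, maior
-- ===== SOURCE B (Python) =====
-- def funciona(n):
--     if n <= 0:
--         return (0, 0)
--     digits = [ord(c) - 48 for c in str(n)]
--     return (sum(digits), max(digits))
-- ===== Notes on version B (the rewrite author's own statement) =====
-- stated objective: idiomatic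
-- what changed: Replaces the arithmetic mod/floordiv digit-extraction loop with a decimal-string traversal: build the digit list from str(n) once, then take sum() and max() of it.
import Mathlib
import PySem

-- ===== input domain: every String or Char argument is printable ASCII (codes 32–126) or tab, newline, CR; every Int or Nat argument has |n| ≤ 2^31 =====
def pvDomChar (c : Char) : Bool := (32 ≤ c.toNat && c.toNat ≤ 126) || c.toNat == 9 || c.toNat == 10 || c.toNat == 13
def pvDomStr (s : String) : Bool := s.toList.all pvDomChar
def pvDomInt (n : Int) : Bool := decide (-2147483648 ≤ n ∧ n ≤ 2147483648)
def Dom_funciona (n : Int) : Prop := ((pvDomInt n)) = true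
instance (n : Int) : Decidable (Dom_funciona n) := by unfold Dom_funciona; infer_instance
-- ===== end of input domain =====

-- B replaces A's mod/floordiv digit-extraction loop by the idiomatic decimal-string
-- traversal: the digit list of str(n), then sum() and max() of that list.

-- ===== PORT A =====
-- A's while-loop: state (n, soma, maior), one digit peeled per iteration.
def funcionaGo (n soma maior : Int) : Int × Int :=
  if _h : 0 < n then
    let digito := PySem.Int.mod n 10
    funcionaGo (PySem.Int.floordiv n 10) (soma + digito)
      (if digito > maior then digito else maior)
  else (soma, maior)
termination_by n.toNat
decreasing_by
  rw [PySem.Int.floordiv_eq_ediv_of_pos (by omega)]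
  omega

def funciona (n : Int) : Int × Int := funcionaGo n 0 0

-- ===== PORT B =====
def funciona_alt (n : Int) : Int × Int :=
  if n ≤ 0 then (0, 0)
  else
    let digits : List Int := (PySem.Int.toChars n).map (fun c => (c.toNat : Int) - 48)
    match PySem.List.max? digits (fun y => y) with
    | some m => (digits.sum, m)
    | none => (0, 0)    -- unreachable: str(n) is nonempty (totality guard for Python's max)

-- ===== PRECONDITION & SPEC =====
def Spec_funciona (n : Int) (out : Int × Int) : Prop := out = funciona_alt n
instance (n : Int) (out : Int × Int) : Decidable (Spec_funciona n out) := by unfold Spec_funciona; infer_instance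

-- ===== CLAIM (what is proved, stated in full; the proofs are below) =====
def Claim_equal_funciona : Prop := ∀ (n : Int), Dom_funciona n → Spec_funciona n (funciona n)

-- ===== LEMMAS AND PROOFS =====

-- proof-side spec: big-endian decimal digits of a natural number (empty for 0)
def bigDigits (m : Nat) : List Int :=
  if h : m = 0 then [] else bigDigits (m / 10) ++ [((m % 10 : Nat) : Int)]
termination_by m
decreasing_by exact Nat.div_lt_self (Nat.pos_of_ne_zero h) (by norm_num)

lemma bigDigits_zero : bigDigits 0 = [] := by unfold bigDigits; simp

lemma bigDigits_pos {m : Nat} (h : m ≠ 0) :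
    bigDigits m = bigDigits (m / 10) ++ [((m % 10 : Nat) : Int)] := by
  conv_lhs => unfold bigDigits
  simp [h]

lemma bigDigits_nonneg (m : Nat) : ∀ d ∈ bigDigits m, 0 ≤ d := by
  induction m using Nat.strong_induction_on with
  | _ m ih =>
    by_cases h : m = 0
    · simp [h, bigDigits_zero]
    · rw [bigDigits_pos h]
      intro d hd
      rcases List.mem_append.mp hd with h1 | h1
      · exact ih (m / 10) (Nat.div_lt_self (Nat.pos_of_ne_zero h) (by norm_num)) d h1
      · simp at h1; omega

lemma bigDigits_ne_nil {m : Nat} (h : m ≠ 0) : bigDigits m ≠ [] := by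
  rw [bigDigits_pos h]; simp

lemma foldl_max_swap (l : List Int) (a b : Int) :
    l.foldl max (max a b) = max b (l.foldl max a) := by
  induction l generalizing a b with
  | nil => simp [max_comm]
  | cons x t ih =>
    simp only [List.foldl_cons]
    rw [show max (max a b) x = max (max a x) b by
      rw [max_assoc, max_comm b x, ← max_assoc], ih]

-- characterisation of A's loop by the big-endian digit list
lemma funcionaGo_eq (m : Nat) (s M : Int) :
    funcionaGo (m : Int) s M = (s + (bigDigits m).sum, (bigDigits m).foldl max M) := by
  induction m using Nat.strong_induction_on generalizing s M with
  | _ m ih =>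
    by_cases h : m = 0
    · subst h
      rw [funcionaGo]
      simp [bigDigits_zero]
    · rw [funcionaGo]
      have hpos : (0:Int) < (m : Int) := by exact_mod_cast Nat.pos_of_ne_zero h
      rw [dif_pos hpos]
      have hmod : PySem.Int.mod ((m : Nat) : Int) 10 = ((m % 10 : Nat) : Int) := by
        rw [PySem.Int.mod_eq_emod_of_pos (by norm_num)]; push_cast; ring
      have hdiv : PySem.Int.floordiv ((m : Nat) : Int) 10 = ((m / 10 : Nat) : Int) := by
        rw [PySem.Int.floordiv_eq_ediv_of_pos (by norm_num)]; push_cast; ring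
      rw [hmod, hdiv]
      show funcionaGo ((m / 10 : Nat) : Int) (s + ((m % 10 : Nat) : Int))
          (if ((m % 10 : Nat) : Int) > M then ((m % 10 : Nat) : Int) else M)
        = (s + (bigDigits m).sum, (bigDigits m).foldl max M)
      rw [show (if ((m % 10 : Nat) : Int) > M then ((m % 10 : Nat) : Int) else M)
            = max M ((m % 10 : Nat) : Int) by split_ifs <;> omega]
      rw [ih (m / 10) (Nat.div_lt_self (Nat.pos_of_ne_zero h) (by norm_num))]
      rw [bigDigits_pos h]
      refine Prod.ext ?_ ?_
      · simp [List.sum_append]; ring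
      · simp only [List.foldl_append, List.foldl_cons, List.foldl_nil]
        rw [foldl_max_swap, max_comm]

-- a digit character read back as its value
lemma dig_digitChar (d : Nat) (h : d < 10) :
    ((Nat.digitChar d).toNat : Int) - 48 = (d : Int) := by
  interval_cases d <;> decide

lemma toDigitsCore_acc (f : Nat) : ∀ (n : Nat) (acc : List Char),
    Nat.toDigitsCore 10 f n acc = Nat.toDigitsCore 10 f n [] ++ acc := by
  induction f with
  | zero => intro n acc; simp [Nat.toDigitsCore]
  | succ f ih =>
    intro n acc
    simp only [Nat.toDigitsCore]
    by_cases h : n / 10 = 0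
    · simp [h]
    · simp only [h, if_false]
      rw [ih (n / 10) [Nat.digitChar (n % 10)], ih (n / 10) (Nat.digitChar (n % 10) :: acc),
        List.append_assoc]
      rfl

lemma toDigitsCore_map_eq_big (f : Nat) : ∀ (m : Nat), m ≠ 0 → m ≤ f →
    (Nat.toDigitsCore 10 f m []).map (fun c => (c.toNat : Int) - 48) = bigDigits m := by
  induction f with
  | zero => intro m hm hf; omega
  | succ f ih =>
    intro m hm hf
    simp only [Nat.toDigitsCore]
    by_cases h : m / 10 = 0
    · simp only [h, if_true, List.map_cons, List.map_nil]
      rw [dig_digitChar (m % 10) (Nat.mod_lt _ (by norm_num)), bigDigits_pos hm, h,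
        bigDigits_zero, List.nil_append]
    · simp only [h, if_false]
      rw [toDigitsCore_acc, List.map_append, ih (m / 10) h (by omega), List.map_cons,
        List.map_nil, dig_digitChar (m % 10) (Nat.mod_lt _ (by norm_num)), bigDigits_pos hm]

-- B's value for positive n, via the same digit list
lemma funciona_alt_pos {n : Int} (h : 0 < n) :
    funciona_alt n = ((bigDigits n.toNat).sum, (bigDigits n.toNat).foldl max 0) := by
  have hm : n.toNat ≠ 0 := by omega
  unfold funciona_alt
  rw [if_neg (by omega)]
  have htc : PySem.Int.toChars n = Nat.toDigits 10 n.toNat := by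
    simp [PySem.Int.toChars, not_lt.mpr h.le]
  have hdigits : (PySem.Int.toChars n).map (fun c => (c.toNat : Int) - 48)
      = bigDigits n.toNat := by
    rw [htc]
    exact toDigitsCore_map_eq_big (n.toNat + 1) n.toNat hm (by omega)
  simp only [hdigits]
  obtain ⟨x, t, hxt⟩ := List.exists_cons_of_ne_nil (bigDigits_ne_nil hm)
  rw [hxt, PySem.List.max?_id_cons]
  have hx : (0:Int) ≤ x := bigDigits_nonneg n.toNat x (by rw [hxt]; exact List.mem_cons_self ..)
  simp only [List.foldl_cons]
  rw [max_eq_right hx]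

-- ===== VERDICT (by name: the statement is the Claim_ definition above) =====
theorem funciona_spec : Claim_equal_funciona := by
  intro n _
  unfold Spec_funciona funciona
  by_cases h : n ≤ 0
  · rw [funcionaGo, dif_neg (by omega)]
    unfold funciona_alt
    rw [if_pos h]
  · have hn : n = (n.toNat : Int) := by omega
    conv_lhs => rw [hn]
    rw [funcionaGo_eq, funciona_alt_pos (show (0:Int) < n by omega), zero_add]
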